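-- pv_equiv track=rewrite | github.com/broadinstitute/gatk-sv | src/gatk-sv-compare/src/gatk_sv_compare/validate.py | _set_info_value
-- ===== SOURCE A (Python) =====
-- from typing import Dict, Iterator, List, Optional, Tuple
--
-- def _set_info_value(fields: List[Tuple[str, Optional[str]]], key: str, value: Optional[str]) -> List[Tuple[str, Optional[str]]]:
--     updated = False
--     result: List[Tuple[str, Optional[str]]] = []
--     for field_key, field_value in fields:
--         if field_key == key:
--             if not updated:
--                 result.append((key, value))
--                 updated = True
--             continue
--         result.append((field_key, field_value))
--     if not updated:
--         result.append((key, value))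
--     return result
-- ===== SOURCE B (Python) =====
-- def _set_info_value(fields, key, value):
--     keys = [k for k, _ in fields]
--     if key in keys:
--         i = keys.index(key)
--         return fields[:i] + [(key, value)] + [f for f in fields[i + 1:] if f[0] != key]
--     return fields + [(key, value)]
-- ===== Notes on version B (the rewrite author's own statement) =====
-- stated objective: simpler
-- what changed: Replaces A's single-pass loop with a mutable 'updated' flag by an index-first decomposition: find the first occurrence of the key, then build the result as slice-before + new pair + key-filtered slice-after, or append when absent.
import Mathlib
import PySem

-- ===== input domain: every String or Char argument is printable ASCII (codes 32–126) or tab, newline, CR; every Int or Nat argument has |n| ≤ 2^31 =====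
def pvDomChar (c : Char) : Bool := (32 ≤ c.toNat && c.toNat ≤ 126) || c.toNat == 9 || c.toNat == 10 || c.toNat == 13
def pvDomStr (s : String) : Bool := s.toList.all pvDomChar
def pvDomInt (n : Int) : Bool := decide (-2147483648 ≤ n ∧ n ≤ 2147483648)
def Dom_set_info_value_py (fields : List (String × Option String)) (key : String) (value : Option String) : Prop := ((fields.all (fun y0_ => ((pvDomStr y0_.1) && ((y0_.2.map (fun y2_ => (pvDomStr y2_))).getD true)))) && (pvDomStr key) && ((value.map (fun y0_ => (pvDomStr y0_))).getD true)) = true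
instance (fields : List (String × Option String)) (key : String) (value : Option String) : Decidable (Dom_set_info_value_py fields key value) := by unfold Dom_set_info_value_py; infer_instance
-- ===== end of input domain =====

-- B replaces A's single-pass loop with a mutable flag by an index-first decomposition
-- (first position of the key, then slice-before ++ new pair ++ key-filtered slice-after);
-- equal return values proved on the whole domain (neither program mutates its argument).

-- ===== PORT A =====
-- the loop over `fields` carrying the `updated` flag, transliterated as structural recursion
def setA_go (key : String) (value : Option String) : List (String × Option String) → Bool → List (String × Option String)
  | [], updated => if !updated then [(key, value)] else []
  | (fk, fv) :: rest, updated =>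
    if fk = key then
      (if !updated then (key, value) :: setA_go key value rest true
       else setA_go key value rest updated)
    else (fk, fv) :: setA_go key value rest updated

def set_info_value_py (fields : List (String × Option String)) (key : String) (value : Option String) : List (String × Option String) :=
  setA_go key value fields false

-- ===== PORT B =====
-- `fields[:i]` / `fields[i+1:]` are nonnegative in-range slices, ported as take/drop (exact here)
def set_info_value_py_alt (fields : List (String × Option String)) (key : String) (value : Option String) : List (String × Option String) :=
  let keys := fields.map Prod.fst
  match PySem.List.index? keys key with
  | some i => fields.take i ++ [(key, value)] ++ (fields.drop (i + 1)).filter (fun f => f.1 != key)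
  | none => fields ++ [(key, value)]

-- ===== PRECONDITION & SPEC =====
def Spec_set_info_value_py (fields : List (String × Option String)) (key : String) (value : Option String) (out : List (String × Option String)) : Prop := out = set_info_value_py_alt fields key value
instance (fields : List (String × Option String)) (key : String) (value : Option String) (out : List (String × Option String)) : Decidable (Spec_set_info_value_py fields key value out) := by unfold Spec_set_info_value_py; infer_instance

-- ===== CLAIM (what is proved, stated in full; the proofs are below) =====
def Claim_equal_set_info_value_py : Prop := ∀ (fields : List (String × Option String)) (key : String) (value : Option String), Dom_set_info_value_py fields key value → Spec_set_info_value_py fields key value (set_info_value_py fields key value)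

-- ===== LEMMAS AND PROOFS =====

-- ===== VERDICT (by name: the statement is the Claim_ definition above) =====
lemma setA_go_true (key : String) (value : Option String) :
    ∀ xs : List (String × Option String),
      setA_go key value xs true = xs.filter (fun f => f.1 != key) := by
  intro xs
  induction xs with
  | nil => simp [setA_go]
  | cons hd tl ih =>
    obtain ⟨fk, fv⟩ := hd
    by_cases h : fk = key <;> simp [setA_go, h, ih, bne]

lemma setA_go_false_eq (key : String) (value : Option String) :
    ∀ fields : List (String × Option String),
      setA_go key value fields false = set_info_value_py_alt fields key value := by
  intro fields
  induction fields with
  | nil => simp [setA_go, set_info_value_py_alt, PySem.List.index?]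
  | cons hd tl ih =>
    obtain ⟨fk, fv⟩ := hd
    by_cases h : fk = key
    · subst h
      simp only [set_info_value_py_alt, List.map_cons, PySem.List.index?_cons_self]
      simp [setA_go, setA_go_true]
    · have hne : fk ≠ key := h
      simp only [set_info_value_py_alt, List.map_cons,
        PySem.List.index?_cons_of_ne _ hne] at *
      cases hidx : PySem.List.index? (tl.map Prod.fst) key with
      | none =>
        rw [hidx] at ih
        simp only [Option.map_none]
        simp [setA_go, h, ih]
      | some i =>
        rw [hidx] at ih
        simp only [Option.map_some]
        simp [setA_go, h, ih]

theorem set_info_value_py_spec : Claim_equal_set_info_value_py := by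
  intro fields key value _hdom
  unfold Spec_set_info_value_py set_info_value_py
  exact setA_go_false_eq key value fields
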